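-- pv_equiv track=rewrite | github.com/l33tdaima/l33tdaima | p954m/can_reorder_doubled.py | canReorderDoubledV1
-- ===== SOURCE A (Python) =====
-- from typing import List
-- from collections import Counter
--
-- def canReorderDoubledV1(arr: List[int]) -> bool:
--     counter = Counter(arr)
--     for a in sorted(arr):
--         if counter[a] <= 0:
--             continue
--         counter[a] -= 1
--         if a < 0:
--             h = a // 2
--             if a % 2 == 0 and h in counter and counter[h] > 0:
--                 counter[h] -= 1
--             else:
--                 return False
--         else:
--             d = a * 2
--             if d in counter and counter[d] > 0:
--                 counter[d] -= 1
--             else: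
--                 return False
--     return True
-- ===== SOURCE B (Python) =====
-- from typing import List
-- from collections import Counter
--
-- def canReorderDoubledV1(arr: List[int]) -> bool:
--     cnt = Counter(arr)
--     for a in sorted(cnt):
--         c = cnt[a]
--         if c == 0:
--             continue
--         if a == 0:
--             if c % 2 != 0:
--                 return False
--             cnt[0] = 0
--         elif a < 0:
--             if a % 2 != 0:
--                 return False
--             cnt[a] = 0
--             h = a // 2
--             if cnt[h] < c:
--                 return False
--             cnt[h] = cnt[h] - c
--         else:
--             cnt[a] = 0
--             d = 2 * a
--             if cnt[d] < c:
--                 return False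
--             cnt[d] = cnt[d] - c
--     return True
-- ===== Notes on version B (the rewrite author's own statement) =====
-- stated objective: alternative
-- what changed: A walks every element of the fully sorted array, pairing one copy at a time with unit decrements of the Counter and skip-passes over already-consumed copies; B iterates once over the sorted distinct keys of the Counter and settles each value-block with a single bulk comparison and subtraction (plus a parity check for zero).
import Mathlib
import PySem

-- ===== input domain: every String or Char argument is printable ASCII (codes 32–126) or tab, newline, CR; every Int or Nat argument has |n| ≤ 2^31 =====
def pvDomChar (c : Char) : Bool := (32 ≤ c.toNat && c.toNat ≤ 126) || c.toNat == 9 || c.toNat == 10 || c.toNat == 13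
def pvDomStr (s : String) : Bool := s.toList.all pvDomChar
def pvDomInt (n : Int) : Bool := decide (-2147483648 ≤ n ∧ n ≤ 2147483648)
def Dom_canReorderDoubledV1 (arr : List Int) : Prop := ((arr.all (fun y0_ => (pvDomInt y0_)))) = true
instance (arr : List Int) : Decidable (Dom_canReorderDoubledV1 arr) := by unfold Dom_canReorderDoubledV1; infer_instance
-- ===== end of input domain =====

-- B replaces A's per-element greedy pass over the fully sorted array (one unit decrement per
-- element, with skip-passes over already-consumed copies) by a loop over the sorted DISTINCT
-- keys of the Counter that settles each value-block with one bulk comparison and subtraction.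

-- ===== PORT A =====
-- the for-loop over sorted(arr) with early 'return False', counter threaded through
def procA : List Int → PySem.Dict Int Int → Bool
  | [], _ => true
  | a :: rest, d =>
    if d.getD a 0 ≤ 0 then procA rest d
    else
      let d1 := d.insert a (d.getD a 0 - 1)
      if a < 0 then
        let h := PySem.Int.floordiv a 2
        if PySem.Int.mod a 2 = 0 ∧ d1.contains h = true ∧ 0 < d1.getD h 0 then
          procA rest (d1.insert h (d1.getD h 0 - 1))
        else false
      else
        let dd := a * 2
        if d1.contains dd = true ∧ 0 < d1.getD dd 0 then
          procA rest (d1.insert dd (d1.getD dd 0 - 1))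
        else false


def canReorderDoubledV1 (arr : List Int) : Bool :=
  procA (PySem.List.sorted arr (fun x => x) false) (PySem.Dict.counter arr)

-- ===== PORT B =====
-- the for-loop over sorted(cnt) (the distinct keys) with early 'return False'
def procB : List Int → PySem.Dict Int Int → Bool
  | [], _ => true
  | a :: ks, d =>
    let c := d.getD a 0
    if c = 0 then procB ks d
    else if a = 0 then
      if PySem.Int.mod c 2 ≠ 0 then false
      else procB ks (d.insert 0 0)
    else if a < 0 then
      if PySem.Int.mod a 2 ≠ 0 then false
      else
        let d1 := d.insert a 0
        let h := PySem.Int.floordiv a 2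
        if d1.getD h 0 < c then false
        else procB ks (d1.insert h (d1.getD h 0 - c))
    else
      let d1 := d.insert a 0
      let dd := 2 * a
      if d1.getD dd 0 < c then false
      else procB ks (d1.insert dd (d1.getD dd 0 - c))


def canReorderDoubledV1_alt (arr : List Int) : Bool :=
  let cnt := PySem.Dict.counter arr
  procB (PySem.List.sorted cnt.keys (fun x => x) false) cnt

-- ===== PRECONDITION & SPEC =====
def Spec_canReorderDoubledV1 (arr : List Int) (out : Bool) : Prop := out = canReorderDoubledV1_alt arr
instance (arr : List Int) (out : Bool) : Decidable (Spec_canReorderDoubledV1 arr out) := by unfold Spec_canReorderDoubledV1; infer_instance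

-- ===== CLAIM (what is proved, stated in full; the proofs are below) =====
def Claim_equal_canReorderDoubledV1 : Prop := ∀ (arr : List Int), Dom_canReorderDoubledV1 arr → Spec_canReorderDoubledV1 arr (canReorderDoubledV1 arr)

-- ===== LEMMAS AND PROOFS =====

-- A's loop with the dict abstracted to its value function
def procAF : List Int → (Int → Int) → Bool
  | [], _ => true
  | a :: rest, f =>
    if f a ≤ 0 then procAF rest f
    else
      let f1 := Function.update f a (f a - 1)
      if a < 0 then
        let h := PySem.Int.floordiv a 2
        if PySem.Int.mod a 2 = 0 ∧ 0 < f1 h then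
          procAF rest (Function.update f1 h (f1 h - 1))
        else false
      else
        let dd := a * 2
        if 0 < f1 dd then
          procAF rest (Function.update f1 dd (f1 dd - 1))
        else false


def procBF : List Int → (Int → Int) → Bool
  | [], _ => true
  | a :: ks, f =>
    let c := f a
    if c = 0 then procBF ks f
    else if a = 0 then
      if PySem.Int.mod c 2 ≠ 0 then false
      else procBF ks (Function.update f 0 0)
    else if a < 0 then
      if PySem.Int.mod a 2 ≠ 0 then false
      else
        let f1 := Function.update f a 0
        let h := PySem.Int.floordiv a 2
        if f1 h < c then false
        else procBF ks (Function.update f1 h (f1 h - c))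
    else
      let f1 := Function.update f a 0
      let dd := 2 * a
      if f1 dd < c then false
      else procBF ks (Function.update f1 dd (f1 dd - c))


-- B-specific helper lemmas and the simulation argument
lemma contains_of_getD_ne {d : PySem.Dict Int Int} {k : Int} (h : d.getD k 0 ≠ 0) :
    d.contains k = true := by
  by_contra hc
  exact h (PySem.Dict.getD_of_not_contains d 0 (by simpa using hc))

lemma getD_insert_fun (d : PySem.Dict Int Int) (a v : Int) :
    (fun k => (d.insert a v).getD k 0) = Function.update (fun k => d.getD k 0) a v := by
  funext k
  simp [PySem.Dict.getD_insert, Function.update_apply]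

lemma absA (xs : List Int) (d : PySem.Dict Int Int) :
    procA xs d = procAF xs (fun k => d.getD k 0) := by
  induction xs generalizing d with
  | nil => rfl
  | cons a rest ih =>
    show (if d.getD a 0 ≤ 0 then procA rest d else _) = _
    simp only [procAF]
    by_cases h0 : d.getD a 0 ≤ 0
    · rw [if_pos h0, if_pos h0, ih]
    · rw [if_neg h0, if_neg h0]
      by_cases hneg : a < 0
      · rw [if_pos hneg, if_pos hneg]
        rw [show Function.update (fun k => d.getD k 0) a (d.getD a 0 - 1)
              = (fun k => (d.insert a (d.getD a 0 - 1)).getD k 0) from (getD_insert_fun ..).symm]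
        set d1 := d.insert a (d.getD a 0 - 1) with hd1
        set h := PySem.Int.floordiv a 2 with hh
        by_cases hc : PySem.Int.mod a 2 = 0 ∧ 0 < d1.getD h 0
        · have hcont : d1.contains h = true := contains_of_getD_ne (by omega)
          rw [if_pos ⟨hc.1, hcont, hc.2⟩, if_pos hc, ih, getD_insert_fun]
        · rw [if_neg (by tauto), if_neg hc]
      · rw [if_neg hneg, if_neg hneg]
        rw [show Function.update (fun k => d.getD k 0) a (d.getD a 0 - 1)
              = (fun k => (d.insert a (d.getD a 0 - 1)).getD k 0) from (getD_insert_fun ..).symm]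
        set d1 := d.insert a (d.getD a 0 - 1) with hd1
        by_cases hc : 0 < d1.getD (a * 2) 0
        · have hcont : d1.contains (a * 2) = true := contains_of_getD_ne (by omega)
          rw [if_pos ⟨hcont, hc⟩, if_pos hc, ih, getD_insert_fun]
        · rw [if_neg (by tauto), if_neg hc]

lemma absB (ks : List Int) (d : PySem.Dict Int Int) :
    procB ks d = procBF ks (fun k => d.getD k 0) := by
  induction ks generalizing d with
  | nil => rfl
  | cons a ks ih =>
    simp only [procB, procBF]
    by_cases h0 : d.getD a 0 = 0
    · rw [if_pos h0, if_pos h0, ih]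
    · rw [if_neg h0, if_neg h0]
      by_cases hz : a = 0
      · rw [if_pos hz, if_pos hz]
        by_cases hodd : PySem.Int.mod (d.getD a 0) 2 ≠ 0
        · rw [if_pos hodd, if_pos hodd]
        · rw [if_neg hodd, if_neg hodd, ih, getD_insert_fun]
      · rw [if_neg hz, if_neg hz]
        by_cases hneg : a < 0
        · rw [if_pos hneg, if_pos hneg]
          by_cases hodd : PySem.Int.mod a 2 ≠ 0
          · rw [if_pos hodd, if_pos hodd]
          · rw [if_neg hodd, if_neg hodd]
            rw [show Function.update (fun k => d.getD k 0) a 0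
                  = (fun k => (d.insert a 0).getD k 0) from (getD_insert_fun ..).symm]
            by_cases hlt : (d.insert a 0).getD (PySem.Int.floordiv a 2) 0 < d.getD a 0
            · rw [if_pos hlt, if_pos hlt]
            · rw [if_neg hlt, if_neg hlt, ih, getD_insert_fun]
        · rw [if_neg hneg, if_neg hneg]
          rw [show Function.update (fun k => d.getD k 0) a 0
                = (fun k => (d.insert a 0).getD k 0) from (getD_insert_fun ..).symm]
          by_cases hlt : (d.insert a 0).getD (2 * a) 0 < d.getD a 0
          · rw [if_pos hlt, if_pos hlt]
          · rw [if_neg hlt, if_neg hlt, ih, getD_insert_fun]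

lemma skipAF (a : Int) (n : Nat) (rest : List Int) (f : Int → Int) (h : f a ≤ 0) :
    procAF (List.replicate n a ++ rest) f = procAF rest f := by
  induction n with
  | zero => rfl
  | succ n ih =>
    rw [List.replicate_succ, List.cons_append]
    simp only [procAF]
    rw [if_pos h, ih]

lemma blockNegOdd (a : Int) (n : Nat) (rest : List Int) (f : Int → Int)
    (ha : a < 0) (hodd : PySem.Int.mod a 2 ≠ 0) (hm : 0 < f a) :
    procAF (List.replicate (n + 1) a ++ rest) f = false := by
  rw [List.replicate_succ, List.cons_append]
  simp only [procAF]
  rw [if_neg (by omega), if_pos ha, if_neg (by tauto)]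

lemma floordiv_ne_self (a : Int) (ha : a < 0) (hev : PySem.Int.mod a 2 = 0) :
    PySem.Int.floordiv a 2 ≠ a := by
  intro h
  have := PySem.Int.floordiv_mul_add_mod a 2
  rw [h, hev] at this
  omega

lemma blockNeg (a m : Int) (n : Nat) (rest : List Int) (f : Int → Int)
    (ha : a < 0) (hev : PySem.Int.mod a 2 = 0) (hfa : f a = m) (h1 : 1 ≤ m) (hn : m ≤ n) :
    procAF (List.replicate n a ++ rest) f =
      (if f (PySem.Int.floordiv a 2) < m then false
       else procAF rest (Function.update (Function.update f a 0) (PySem.Int.floordiv a 2)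
              (f (PySem.Int.floordiv a 2) - m))) := by
  induction n generalizing f m with
  | zero => omega
  | succ n ih =>
    have hha : PySem.Int.floordiv a 2 ≠ a := floordiv_ne_self a ha hev
    set h := PySem.Int.floordiv a 2 with hh
    rw [List.replicate_succ, List.cons_append]
    simp only [procAF]
    rw [if_neg (by omega), if_pos ha]
    have e1 : Function.update f a (f a - 1) h = f h := Function.update_of_ne hha _ _
    by_cases hH : 0 < f h
    · rw [if_pos ⟨hev, by rw [e1]; exact hH⟩, e1]
      set f2 := Function.update (Function.update f a (f a - 1)) h (f h - 1) with hf2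
      have hf2a : f2 a = m - 1 := by
        rw [hf2, Function.update_of_ne (Ne.symm hha), Function.update_self, hfa]
      have hf2h : f2 h = f h - 1 := by rw [hf2, Function.update_self]
      by_cases hm1 : m = 1
      · have : f2 a ≤ 0 := by omega
        rw [skipAF a n rest f2 this]
        rw [if_neg (by omega)]
        apply congrArg
        funext k
        simp only [hf2, Function.update_apply]
        split_ifs with hk1 hk2 <;> simp_all
      · rw [ih (m - 1) f2 hf2a (by omega) (by omega)]
        rw [hf2h]
        by_cases hlt : f h < m
        · rw [if_pos (by omega), if_pos hlt]
        · rw [if_neg (by omega), if_neg hlt]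
          apply congrArg
          funext k
          simp only [hf2, Function.update_apply]
          split_ifs with hk1 hk2 <;> simp_all
    · rw [if_neg (by rw [e1]; tauto), if_pos (by omega)]

lemma blockPos (a m : Int) (n : Nat) (rest : List Int) (f : Int → Int)
    (ha : 0 < a) (hfa : f a = m) (h1 : 1 ≤ m) (hn : m ≤ n) :
    procAF (List.replicate n a ++ rest) f =
      (if f (a * 2) < m then false
       else procAF rest (Function.update (Function.update f a 0) (a * 2)
              (f (a * 2) - m))) := by
  induction n generalizing f m with
  | zero => omega
  | succ n ih =>
    have hha : a * 2 ≠ a := by omega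
    rw [List.replicate_succ, List.cons_append]
    simp only [procAF]
    rw [if_neg (by omega), if_neg (by omega)]
    have e1 : Function.update f a (f a - 1) (a * 2) = f (a * 2) := Function.update_of_ne hha _ _
    by_cases hH : 0 < f (a * 2)
    · rw [if_pos (by rw [e1]; exact hH), e1]
      set f2 := Function.update (Function.update f a (f a - 1)) (a * 2) (f (a * 2) - 1) with hf2
      have hf2a : f2 a = m - 1 := by
        rw [hf2, Function.update_of_ne (Ne.symm hha), Function.update_self, hfa]
      have hf2h : f2 (a * 2) = f (a * 2) - 1 := by rw [hf2, Function.update_self]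
      by_cases hm1 : m = 1
      · have : f2 a ≤ 0 := by omega
        rw [skipAF a n rest f2 this]
        rw [if_neg (by omega)]
        apply congrArg
        funext k
        simp only [hf2, Function.update_apply]
        split_ifs with hk1 hk2 <;> simp_all
      · rw [ih (m - 1) f2 hf2a (by omega) (by omega)]
        rw [hf2h]
        by_cases hlt : f (a * 2) < m
        · rw [if_pos (by omega), if_pos hlt]
        · rw [if_neg (by omega), if_neg hlt]
          apply congrArg
          funext k
          simp only [hf2, Function.update_apply]
          split_ifs with hk1 hk2 <;> simp_all
    · rw [if_neg (by rw [e1]; tauto), if_pos (by omega)]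

lemma blockZero (m : Int) (n : Nat) (rest : List Int) (f : Int → Int)
    (hfa : f 0 = m) (h1 : 1 ≤ m) (hn : m ≤ n) :
    procAF (List.replicate n (0 : Int) ++ rest) f =
      (if PySem.Int.mod m 2 ≠ 0 then false
       else procAF rest (Function.update f 0 0)) := by
  induction n generalizing f m with
  | zero => omega
  | succ n ih =>
    have hmod : PySem.Int.mod m 2 = m % 2 := PySem.Int.mod_eq_emod_of_pos (by omega)
    rw [List.replicate_succ, List.cons_append]
    simp only [procAF]
    rw [if_neg (by omega), if_neg (by omega)]
    have e0 : (0 : Int) * 2 = 0 := by omega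
    rw [e0]
    have e1 : Function.update f 0 (f 0 - 1) 0 = f 0 - 1 := Function.update_self ..
    rw [e1]
    by_cases hm1 : m = 1
    · rw [if_neg (by omega), if_pos (by rw [hmod]; omega)]
    · rw [if_pos (by omega)]
      set f2 := Function.update (Function.update f 0 (f 0 - 1)) 0 (f 0 - 1 - 1) with hf2
      have hf2z : f2 0 = m - 2 := by rw [hf2, Function.update_self]; omega
      have hf2eq : f2 = Function.update f 0 (m - 2) := by
        rw [hf2, Function.update_idem, hfa]; ring_nf
      by_cases hm2 : m = 2
      · rw [skipAF 0 n rest f2 (by omega)]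
        rw [if_neg (by rw [hmod]; omega)]
        apply congrArg
        rw [hf2eq, hm2]
        norm_num
      · rw [ih (m - 2) f2 hf2z (by omega) (by omega)]
        have hmod2 : PySem.Int.mod (m - 2) 2 = PySem.Int.mod m 2 := by
          rw [hmod, PySem.Int.mod_eq_emod_of_pos (by omega : (0:Int) < 2)]; omega
        rw [hmod2]
        by_cases hodd : PySem.Int.mod m 2 ≠ 0
        · rw [if_pos hodd, if_pos hodd]
        · rw [if_neg hodd, if_neg hodd]
          apply congrArg
          rw [hf2eq, Function.update_idem]

lemma sorted_cons_block (a : Int) (t : List Int) (h : (a :: t).Pairwise (· ≤ ·)) :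
    ∃ (n : Nat) (rest : List Int), a :: t = List.replicate (n + 1) a ++ rest ∧
      (∀ x ∈ rest, a < x) ∧ rest.Pairwise (· ≤ ·) := by
  induction t generalizing a with
  | nil => exact ⟨0, [], rfl, by simp, List.Pairwise.nil⟩
  | cons b t ih =>
    rcases List.pairwise_cons.mp h with ⟨hab, hbt⟩
    by_cases heq : a = b
    · subst heq
      obtain ⟨n, rest, he, hlt, hp⟩ := ih a hbt
      exact ⟨n + 1, rest, by rw [List.replicate_succ, List.cons_append, ← he], hlt, hp⟩
    · have halt : a < b := lt_of_le_of_ne (hab b (by simp)) heq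
      refine ⟨0, b :: t, by simp, ?_, hbt⟩
      intro x hx
      rcases List.mem_cons.mp hx with rfl | hx
      · exact halt
      · exact lt_of_lt_of_le halt ((List.pairwise_cons.mp hbt).1 x hx)
lemma mainF (N : Nat) : ∀ (xs ks : List Int) (f : Int → Int), xs.length ≤ N →
    xs.Pairwise (· ≤ ·) → ks.Pairwise (· < ·) → (∀ k, k ∈ ks ↔ k ∈ xs) →
    (∀ k, 0 ≤ f k ∧ f k ≤ (xs.count k : Int)) →
    procAF xs f = procBF ks f := by
  induction N with
  | zero =>
    intro xs ks f hlen _ _ hmem _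
    have hxs : xs = [] := List.eq_nil_of_length_eq_zero (by omega)
    subst hxs
    have hks : ks = [] := List.eq_nil_iff_forall_not_mem.mpr (fun k hk => by simp [hmem k] at hk)
    subst hks; rfl
  | succ N ih =>
    intro xs ks f hlen hsx hsk hmem hinv
    cases xs with
    | nil =>
      have hks : ks = [] := List.eq_nil_iff_forall_not_mem.mpr (fun k hk => by simp [hmem k] at hk)
      subst hks; rfl
    | cons a t =>
      obtain ⟨n, rest, he, hlt, hp⟩ := sorted_cons_block a t hsx
      have hanr : a ∉ rest := fun hx => lt_irrefl a (hlt a hx)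
      have hcnt : (a :: t).count a = n + 1 := by
        rw [he]; simp [List.count_append, List.count_eq_zero.mpr hanr]
      have hcntk : ∀ k : Int, k ≠ a → (a :: t).count k = rest.count k := by
        intro k hk
        rw [he]; simp [List.count_append, List.count_replicate, Ne.symm hk]
      have hlenr : rest.length ≤ N := by
        have := congrArg List.length he
        simp only [List.length_append, List.length_replicate, List.length_cons] at this hlen
        omega
      have ha_mem : a ∈ ks := (hmem a).mpr (by simp)
      cases ks with
      | nil => simp at ha_mem
      | cons k0 ks' =>
        have hxge : ∀ x ∈ a :: t, a ≤ x := by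
          intro x hx
          rcases List.mem_cons.mp hx with rfl | hx
          · exact le_refl x
          · exact (List.pairwise_cons.mp hsx).1 x hx
        have hk0 : k0 = a := by
          rcases List.mem_cons.mp ha_mem with h | h
          · exact h.symm
          · have h1 : k0 < a := (List.pairwise_cons.mp hsk).1 a h
            have h2 : a ≤ k0 := hxge k0 ((hmem k0).mp (by simp))
            omega
        subst hk0
        have hsk' : ks'.Pairwise (· < ·) := (List.pairwise_cons.mp hsk).2
        have hks'lt : ∀ x ∈ ks', k0 < x := (List.pairwise_cons.mp hsk).1
        have hmem' : ∀ k, k ∈ ks' ↔ k ∈ rest := by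
          intro k
          constructor
          · intro hk
            have hak : k0 < k := hks'lt k hk
            have hin : k ∈ k0 :: t := (hmem k).mp (List.mem_cons_of_mem _ hk)
            rw [he] at hin
            rcases List.mem_append.mp hin with hin | hin
            · exact absurd (List.eq_of_mem_replicate hin) (by omega)
            · exact hin
          · intro hk
            have hin : k ∈ k0 :: t := by rw [he]; exact List.mem_append.mpr (Or.inr hk)
            have hks : k ∈ k0 :: ks' := (hmem k).mpr hin
            rcases List.mem_cons.mp hks with rfl | h
            · exact absurd (hlt k hk) (lt_irrefl k)
            · exact h
        obtain ⟨hge, hle⟩ := hinv k0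
        have hma : f k0 ≤ (n : Int) + 1 := by
          rw [hcnt] at hle; push_cast at hle; omega
        rw [he]
        by_cases hm0 : f k0 = 0
        · rw [skipAF k0 (n + 1) rest f (by omega)]
          show _ = procBF (k0 :: ks') f
          simp only [procBF]
          rw [if_pos hm0]
          refine ih rest ks' f hlenr hp hsk' hmem' ?_
          intro k
          by_cases hk : k = k0
          · subst hk; exact ⟨by omega, by rw [hm0]; positivity⟩
          · rw [← hcntk k hk]; exact hinv k
        · have hm1 : (1 : Int) ≤ f k0 := by omega
          show _ = procBF (k0 :: ks') f
          simp only [procBF]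
          rw [if_neg hm0]
          by_cases hz : k0 = 0
          · subst hz
            rw [blockZero (f 0) (n + 1) rest f rfl hm1 (by push_cast; omega)]
            rw [if_pos rfl]
            by_cases hodd : PySem.Int.mod (f 0) 2 ≠ 0
            · rw [if_pos hodd, if_pos hodd]
            · rw [if_neg hodd, if_neg hodd]
              refine ih rest ks' _ hlenr hp hsk' hmem' ?_
              intro k
              by_cases hk : k = 0
              · subst hk; simp [Function.update_self]
              · rw [Function.update_of_ne hk, ← hcntk k hk]; exact hinv k
          · rw [if_neg hz]
            by_cases hneg : k0 < 0
            · rw [if_pos hneg]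
              by_cases hodd : PySem.Int.mod k0 2 ≠ 0
              · rw [if_pos hodd]
                exact blockNegOdd k0 n rest f hneg hodd (by omega)
              · rw [if_neg hodd]
                push Not at hodd
                have hha : PySem.Int.floordiv k0 2 ≠ k0 := floordiv_ne_self k0 hneg hodd
                set h := PySem.Int.floordiv k0 2 with hh
                rw [blockNeg k0 (f k0) (n + 1) rest f hneg hodd rfl hm1 (by push_cast; omega)]
                rw [Function.update_of_ne hha]
                by_cases hcond : f h < f k0
                · rw [if_pos hcond, if_pos hcond]
                · rw [if_neg hcond, if_neg hcond]
                  refine ih rest ks' _ hlenr hp hsk' hmem' ?_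
                  intro k
                  by_cases hk : k = h
                  · rw [hk, Function.update_self]
                    simp only [← hh]
                    have h2 := (hinv h).2
                    rw [hcntk h hha] at h2
                    exact ⟨by omega, by omega⟩
                  · rw [Function.update_of_ne hk]
                    by_cases hk0 : k = k0
                    · subst hk0
                      rw [Function.update_self]
                      exact ⟨le_refl 0, by positivity⟩
                    · rw [Function.update_of_ne hk0, ← hcntk k hk0]
                      exact hinv k
            · rw [if_neg hneg]
              have hpos : 0 < k0 := by
                rcases lt_trichotomy k0 0 with h | h | h
                · exact absurd h hneg
                · exact absurd h hz
                · exact h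
              have hha : 2 * k0 ≠ k0 := by omega
              rw [blockPos k0 (f k0) (n + 1) rest f hpos rfl hm1 (by push_cast; omega)]
              rw [Function.update_of_ne hha]
              rw [show k0 * 2 = 2 * k0 by ring]
              by_cases hcond : f (2 * k0) < f k0
              · rw [if_pos hcond, if_pos hcond]
              · rw [if_neg hcond, if_neg hcond]
                refine ih rest ks' _ hlenr hp hsk' hmem' ?_
                intro k
                by_cases hk : k = 2 * k0
                · rw [hk, Function.update_self]
                  have h2 := (hinv (2 * k0)).2
                  rw [hcntk (2 * k0) hha] at h2
                  exact ⟨by omega, by omega⟩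
                · rw [Function.update_of_ne hk]
                  by_cases hk0 : k = k0
                  · subst hk0
                    rw [Function.update_self]
                    exact ⟨le_refl 0, by positivity⟩
                  · rw [Function.update_of_ne hk0, ← hcntk k hk0]
                    exact hinv k

-- ===== VERDICT (by name: the statement is the Claim_ definition above) =====
theorem canReorderDoubledV1_spec : Claim_equal_canReorderDoubledV1 := by
  intro arr _
  unfold Spec_canReorderDoubledV1 canReorderDoubledV1 canReorderDoubledV1_alt
  rw [absA, absB]
  apply mainF (PySem.List.sorted arr (fun x => x) false).length
  · exact le_refl _
  · exact PySem.List.sorted_pairwise arr (fun x => x)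
  · rw [PySem.Dict.keys_counter]
    exact PySem.List.sorted_ofList_pairwise_lt arr
  · intro k
    rw [PySem.List.mem_sorted, PySem.List.mem_sorted, PySem.Dict.keys_counter,
      PySem.Set.mem_ofList]
  · intro k
    rw [PySem.Dict.getD_counter,
      (PySem.List.sorted_perm arr (fun x => x) false).count_eq k]
    exact ⟨by positivity, le_refl _⟩
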